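-- pv_equiv track=rewrite | github.com/swarmer/nlist | nlist.py | group_every_n
-- ===== SOURCE A (Python) =====
-- import itertools
-- from itertools import islice
--
-- def group_every_n(l, n):
--     rest = l
--     while True:
--         rest1, rest2 = itertools.tee(rest)
--         group, rest = list(islice(rest1, n)), islice(rest2, n, None)
--         if not group:
--             break
--         yield group
-- ===== SOURCE B (Python) =====
-- def group_every_n(l, n):
--     cur = []
--     for x in l:
--         cur.append(x)
--         if len(cur) == n:
--             yield cur
--             cur = []
--     if cur:
--         yield cur
-- ===== Notes on version B (the rewrite author's own statement) =====
-- stated objective: alternative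
-- what changed: Replaces the per-round itertools.tee + double islice re-slicing of the remaining iterator with a single forward pass that accumulates elements and yields each chunk when it reaches size n.
-- outside the precondition, e.g. on group_every_n([1, 2], 0): A returns [], B returns [[1, 2]]
import Mathlib
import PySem

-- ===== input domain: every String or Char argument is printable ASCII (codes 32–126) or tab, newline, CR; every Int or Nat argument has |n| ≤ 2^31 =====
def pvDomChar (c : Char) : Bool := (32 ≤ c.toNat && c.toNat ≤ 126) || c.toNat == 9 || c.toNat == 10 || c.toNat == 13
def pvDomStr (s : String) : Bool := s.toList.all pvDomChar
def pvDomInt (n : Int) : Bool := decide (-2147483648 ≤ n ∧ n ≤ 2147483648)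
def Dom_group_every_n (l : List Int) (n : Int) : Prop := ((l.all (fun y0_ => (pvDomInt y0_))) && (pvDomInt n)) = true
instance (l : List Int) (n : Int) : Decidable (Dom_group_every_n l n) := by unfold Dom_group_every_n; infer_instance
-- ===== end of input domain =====

-- B replaces A's per-round tee + double-islice re-slicing of the remainder with a single
-- forward pass that accumulates a chunk and emits it when it fills (objective: alternative).

-- ===== PORT A =====
-- A's loop: each round, group = first n of rest, rest = rest minus its first n, stop when
-- group is empty.  Fuel l.length + 1 bounds the rounds (each non-final round, n ≥ 1 under
-- Pre_, consumes ≥ 1 element).  islice with n < 0 raises ValueError in Python (excluded by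
-- Pre_); `n.toNat` is exact for the admitted n ≥ 1.
def groupA_go : Nat → List Int → Int → List (List Int)
  | 0, _, _ => []
  | fuel + 1, rest, n =>
    let group := rest.take n.toNat
    let rest' := rest.drop n.toNat
    if group = [] then [] else group :: groupA_go fuel rest' n

def group_every_n (l : List Int) (n : Int) : List (List Int) :=
  groupA_go (l.length + 1) l n

-- ===== PORT B =====
-- single pass: cur accumulates; when len(cur) == n, yield cur and reset; trailing cur yielded
def altStep (n : Int) (s : List (List Int) × List Int) (x : Int) : List (List Int) × List Int :=
  let cur := s.2 ++ [x]
  if (cur.length : Int) = n then (s.1 ++ [cur], []) else (s.1, cur)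

def group_every_n_alt (l : List Int) (n : Int) : List (List Int) :=
  let s := l.foldl (altStep n) ([], [])
  if s.2 = [] then s.1 else s.1 ++ [s.2]

-- ===== PRECONDITION & SPEC =====
-- Pre_ excludes n ≤ 0: for n < 0 Python A raises ValueError (islice rejects a negative stop);
-- for n = 0 A returns [] while any size-0 chunking is undefined — a defensible-corner
-- artefact of islice's empty slice, B returns the whole list as one chunk there.
def Pre_group_every_n (l : List Int) (n : Int) : Prop := 1 ≤ n
instance (l : List Int) (n : Int) : Decidable (Pre_group_every_n l n) := by
  unfold Pre_group_every_n; infer_instance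

def pvWitness_group_every_n : List Int × Int := ([1, 2, 3, 4, 5], 2)

def Spec_group_every_n (l : List Int) (n : Int) (out : List (List Int)) : Prop :=
  out = group_every_n_alt l n
instance (l : List Int) (n : Int) (out : List (List Int)) : Decidable (Spec_group_every_n l n out) := by
  unfold Spec_group_every_n; infer_instance

-- ===== CLAIM (what is proved, stated in full; the proofs are below) =====
def Claim_equal_group_every_n : Prop := ∀ (l : List Int) (n : Int),
  Dom_group_every_n l n → Pre_group_every_n l n →
  Spec_group_every_n l n (group_every_n l n)

-- ===== LEMMAS AND PROOFS =====

-- the accumulated output list factors out of the fold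
theorem fold_out_append (n : Int) (xs : List Int) (out : List (List Int)) (cur : List Int) :
    xs.foldl (altStep n) (out, cur)
      = (out ++ (xs.foldl (altStep n) ([], cur)).1, (xs.foldl (altStep n) ([], cur)).2) := by
  induction xs generalizing out cur with
  | nil => simp
  | cons x xs ih =>
    simp only [List.foldl_cons, altStep]
    split
    · rw [ih (out ++ [cur ++ [x]]) []]
      simp only [List.nil_append]
      rw [ih [cur ++ [x]] []]
      simp
    · exact ih out (cur ++ [x])

-- a fold that exactly fills the current chunk
theorem fold_fill (n : Int) (xs cur : List Int)
    (h : (cur.length : Int) + xs.length = n) (hlt : (cur.length : Int) < n) :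
    xs.foldl (altStep n) (([] : List (List Int)), cur) = ([cur ++ xs], []) := by
  induction xs generalizing cur with
  | nil => simp at h; omega
  | cons x xs ih =>
    simp only [List.foldl_cons, altStep]
    by_cases hc : ((cur ++ [x]).length : Int) = n
    · simp only [hc, if_pos]
      have hx : xs = [] := by
        have h1 : ((cur ++ [x]).length : Int) = n := hc
        have : xs.length = 0 := by simp at h h1; omega
        exact List.length_eq_zero_iff.mp this
      subst hx; simp
    · simp only [hc, if_neg, not_false_iff]
      have := ih (cur ++ [x]) (by simp at h ⊢; omega)
        (by simp at hc ⊢; simp at h; omega)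
      simpa using this

-- a fold that never fills the current chunk
theorem fold_nofill (n : Int) (xs cur : List Int)
    (h : (cur.length : Int) + xs.length < n) :
    xs.foldl (altStep n) (([] : List (List Int)), cur) = ([], cur ++ xs) := by
  induction xs generalizing cur with
  | nil => simp
  | cons x xs ih =>
    simp only [List.foldl_cons, altStep]
    have hc : ¬ (((cur ++ [x]).length : Int) = n) := by simp at h ⊢; omega
    simp only [hc, if_neg, not_false_iff]
    have := ih (cur ++ [x]) (by simp at h ⊢; omega)
    simpa using this

-- one chunk-extraction step of B, for nonempty input and n ≥ 1
theorem alt_step (l : List Int) (n : Int) (hn : 1 ≤ n) (hl : l ≠ []) :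
    group_every_n_alt l n = l.take n.toNat :: group_every_n_alt (l.drop n.toNat) n := by
  rcases lt_trichotomy (l.length : Int) n with hlen | hlen | hlen
  · -- whole list is one short chunk; drop is empty
    have htake : l.take n.toNat = l := List.take_of_length_le (by omega)
    have hdrop : l.drop n.toNat = [] := List.drop_eq_nil_of_le (by omega)
    simp [group_every_n_alt, fold_nofill n l [] (by simpa using hlen), hl, htake, hdrop]
  · -- exactly one full chunk
    have htake : l.take n.toNat = l := List.take_of_length_le (by omega)
    have hdrop : l.drop n.toNat = [] := List.drop_eq_nil_of_le (by omega)
    have hfill := fold_fill n l [] (by simpa using hlen) (by simp; omega)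
    simp [group_every_n_alt, hfill, htake, hdrop]
  · -- l = take ++ drop, the take part fills one chunk, recurse on drop
    have hsplit : l = l.take n.toNat ++ l.drop n.toNat := (List.take_append_drop _ l).symm
    have hlt : n.toNat ≤ l.length := by omega
    have htl : (l.take n.toNat).length = n.toNat := List.length_take_of_le hlt
    conv_lhs => rw [group_every_n_alt, hsplit]
    rw [List.foldl_append, fold_fill n (l.take n.toNat) []
        (by simp [htl]; omega) (by simp; omega)]
    simp only [List.nil_append]
    rw [fold_out_append n (l.drop n.toNat) [l.take n.toNat] []]
    simp only [group_every_n_alt]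
    by_cases hF : (List.foldl (altStep n) (([] : List (List Int)), []) (l.drop n.toNat)).2 = [] <;>
      simp [hF]

theorem go_eq_alt (n : Int) (hn : 1 ≤ n) :
    ∀ fuel rest, rest.length < fuel → groupA_go fuel rest n = group_every_n_alt rest n := by
  intro fuel
  induction fuel with
  | zero => intro rest h; omega
  | succ f ih =>
    intro rest h
    by_cases hr : rest = []
    · subst hr; simp [groupA_go, group_every_n_alt]
    · have hne : rest.take n.toNat ≠ [] := by
        simp [List.take_eq_nil_iff, hr]; omega
      rw [groupA_go]
      simp only [hne, if_neg, not_false_iff]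
      have hd : (rest.drop n.toNat).length < f := by
        have h1 : 1 ≤ rest.length := List.length_pos_iff.mpr hr
        simp only [List.length_drop]
        omega
      rw [ih (rest.drop n.toNat) hd, alt_step rest n hn hr]

-- ===== VERDICT (by name: the statement is the Claim_ definition above) =====
theorem group_every_n_spec : Claim_equal_group_every_n := by
  intro l n _ hpre
  unfold Spec_group_every_n group_every_n
  exact go_eq_alt n hpre (l.length + 1) l (by omega)
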